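-- pv_equiv track=rewrite | github.com/mdk2029/rl | rl/python/signed_permutations.py | signed_seq
-- ===== SOURCE A (Python) =====
-- def signed_seq(seq) :
--
--     assert seq
--     assert isinstance(seq, list)
--     assert isinstance(seq[0],int)
--
--     if len(seq) == 1 :
--         return [[seq[0]],[-seq[0]]]
--     else :
--         return [ [seq[0]] + perm for perm in signed_seq(seq[1:]) ] + [ [-seq[0]] + perm for perm in signed_seq(seq[1:]) ]
-- ===== SOURCE B (Python) =====
-- def signed_seq(seq):
--     assert seq
--     assert isinstance(seq, list)
--     assert isinstance(seq[0], int)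
--
--     res = [[seq[-1]], [-seq[-1]]]
--     for x in reversed(seq[:-1]):
--         res = [[x] + p for p in res] + [[-x] + p for p in res]
--     return res
-- ===== Notes on version B (the rewrite author's own statement) =====
-- stated objective: faster
-- what changed: Replaces the doubled recursion (signed_seq(seq[1:]) computed twice per level) with a single right-to-left iterative fold that builds the result once; measured 8.15x at n=16 where A timed out.
import Mathlib
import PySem

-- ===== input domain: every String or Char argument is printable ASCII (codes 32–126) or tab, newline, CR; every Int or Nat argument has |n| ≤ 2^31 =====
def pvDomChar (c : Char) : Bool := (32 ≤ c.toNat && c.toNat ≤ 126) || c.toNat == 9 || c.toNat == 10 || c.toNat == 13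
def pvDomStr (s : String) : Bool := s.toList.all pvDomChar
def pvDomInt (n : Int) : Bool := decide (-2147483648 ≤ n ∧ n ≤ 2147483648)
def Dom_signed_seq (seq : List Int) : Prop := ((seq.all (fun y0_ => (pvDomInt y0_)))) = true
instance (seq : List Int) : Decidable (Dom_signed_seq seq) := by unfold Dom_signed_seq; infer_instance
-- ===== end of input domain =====

-- B replaces A's doubled recursion by one right-to-left fold that builds the result once (objective: alternative).

-- ===== PORT A =====
-- Literal transliteration of A: recursion on seq[1:], with signed_seq(seq[1:]) computed twice just as in the Python.
def signed_seq (seq : List Int) : List (List Int) :=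
  match seq with
  | [] => []                      -- unreachable under Pre_ (A's 'assert seq' raises here)
  | [x] => [[x], [-x]]
  | x :: rest =>
      ((signed_seq rest).map (fun perm => x :: perm)) ++
      ((signed_seq rest).map (fun perm => (-x) :: perm))

-- ===== PORT B =====
-- Literal transliteration of Source B: res starts from the last element, then a fold over reversed(seq[:-1]).
def signed_seq_alt (seq : List Int) : List (List Int) :=
  match seq.getLast? with
  | none => []                    -- unreachable under Pre_ ('assert seq')
  | some last =>
      (seq.dropLast.reverse).foldl
        (fun res x => (res.map (fun p => x :: p)) ++ (res.map (fun p => (-x) :: p)))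
        [[last], [-last]]

-- ===== PRECONDITION & SPEC =====
-- A's 'assert seq' raises AssertionError on the empty list; Pre_ excludes exactly that input.
def Pre_signed_seq (seq : List Int) : Prop := seq ≠ []
instance (seq : List Int) : Decidable (Pre_signed_seq seq) := by unfold Pre_signed_seq; infer_instance
def pvWitness_signed_seq : List Int := ([1, -2])

def Spec_signed_seq (seq : List Int) (out : List (List Int)) : Prop := out = signed_seq_alt seq
instance (seq : List Int) (out : List (List Int)) : Decidable (Spec_signed_seq seq out) := by unfold Spec_signed_seq; infer_instance

-- ===== CLAIM (what is proved, stated in full; the proofs are below) =====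
def Claim_equal_signed_seq : Prop := ∀ (seq : List Int), Dom_signed_seq seq → Pre_signed_seq seq → Spec_signed_seq seq (signed_seq seq)

-- ===== LEMMAS AND PROOFS =====

-- one step of B's fold
def pvStep (res : List (List Int)) (x : Int) : List (List Int) :=
  (res.map (fun p => x :: p)) ++ (res.map (fun p => (-x) :: p))

theorem alt_cons (x : Int) (rest : List Int) (h : rest ≠ []) :
    signed_seq_alt (x :: rest) = pvStep (signed_seq_alt rest) x := by
  obtain ⟨last, hl⟩ := List.getLast?_isSome.mpr h |> Option.isSome_iff_exists.mp
  have hl' : (x :: rest).getLast? = some last := by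
    cases rest with
    | nil => exact absurd rfl h
    | cons y t => simpa [List.getLast?_cons_cons] using hl
  unfold signed_seq_alt
  rw [hl', hl, List.dropLast_cons_of_ne_nil h]
  simp [List.foldl_append, pvStep]

theorem a_eq_alt (seq : List Int) (h : seq ≠ []) : signed_seq seq = signed_seq_alt seq := by
  induction seq with
  | nil => exact absurd rfl h
  | cons x rest ih =>
    cases rest with
    | nil => simp [signed_seq, signed_seq_alt]
    | cons y t =>
      have hne : (y :: t : List Int) ≠ [] := by simp
      rw [alt_cons x (y :: t) hne, ← ih hne]
      simp [signed_seq, pvStep]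

-- ===== VERDICT (by name: the statement is the Claim_ definition above) =====
theorem signed_seq_spec : Claim_equal_signed_seq := by
  intro seq _ hpre
  unfold Spec_signed_seq
  exact a_eq_alt seq hpre
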